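-- pv_equiv track=rewrite | github.com/openconfig/public | pyang_env/lib/python3.11/site-packages/pyang/transforms/edit.py | get_arg_summary
-- ===== SOURCE A (Python) =====
-- def get_arg_summary(arg):
--     lines = arg.splitlines()
--     summary = ''
--     prev = ''
--     discard_prev = False
--     for line in lines:
--         if line.strip().startswith('Copyright '):
--             if prev.strip() == '':
--                 discard_prev = True
--             break
--         if prev != '':
--             summary += prev
--         prev = ''
--         if summary != '':
--             prev += '\n'
--         prev += line
--     if prev and not discard_prev:
--         summary += prev
--     return summary if summary else 'TBD'
-- ===== SOURCE B (Python) =====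
-- def get_arg_summary(arg):
--     lines = arg.splitlines()
--     idx = next((i for i, l in enumerate(lines)
--                 if l.strip().startswith('Copyright ')), None)
--     prefix = lines if idx is None else lines[:idx]
--     while prefix and prefix[0] == '':
--         prefix = prefix[1:]
--     if idx is not None and prefix and prefix[-1].strip() == '':
--         prefix = prefix[:-1]
--     return '\n'.join(prefix) if prefix else 'TBD'
-- ===== Notes on version B (the rewrite author's own statement) =====
-- stated objective: simpler
-- what changed: Replaced A's single-pass delayed-flush string accumulator (prev/discard_prev state machine with break) by a two-phase locate-then-slice decomposition: find the index of the first copyright line, take the line prefix before it, drop leading empty lines and at most one trailing blank line, then join.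
import Mathlib
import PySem

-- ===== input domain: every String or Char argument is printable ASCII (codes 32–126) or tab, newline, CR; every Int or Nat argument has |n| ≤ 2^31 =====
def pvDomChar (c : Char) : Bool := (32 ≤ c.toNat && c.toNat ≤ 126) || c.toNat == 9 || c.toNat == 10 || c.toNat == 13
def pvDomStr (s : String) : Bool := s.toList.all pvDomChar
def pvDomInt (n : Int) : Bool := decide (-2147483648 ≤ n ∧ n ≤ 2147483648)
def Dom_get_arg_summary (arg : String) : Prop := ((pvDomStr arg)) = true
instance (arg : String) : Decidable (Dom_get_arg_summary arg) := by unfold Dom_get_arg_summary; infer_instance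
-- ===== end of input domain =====

-- B replaces A's delayed-flush prev/discard_prev accumulator with a two-phase
-- locate-Copyright / slice-and-join decomposition (objective: simpler).

-- ===== PORT A =====
-- the for-loop of A, with early break on a Copyright line; state = (summary, prev),
-- result = (summary, prev, discard_prev)
def pvLoopA : List String → String → String → String × String × Bool
  | [], summary, prev => (summary, prev, false)
  | line :: rest, summary, prev =>
    if PySem.Str.startswith (PySem.Str.strip line) "Copyright " then
      (summary, prev, PySem.Str.strip prev == "")
    else
      let summary := if prev ≠ "" then summary ++ prev else summary
      let prev := if summary ≠ "" then "\n" ++ line else line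
      pvLoopA rest summary prev

def get_arg_summary (arg : String) : String :=
  let lines := PySem.Str.splitlines arg
  let r := pvLoopA lines "" ""
  let summary := if r.2.1 ≠ "" ∧ r.2.2 = false then r.1 ++ r.2.1 else r.1
  if summary ≠ "" then summary else "TBD"

-- ===== PORT B =====
-- Source B's 'while prefix and prefix[0] == ""' leading-blank-line drop
def pvDropLeadingEmpty : List String → List String
  | [] => []
  | l :: rest => if l = "" then pvDropLeadingEmpty rest else l :: rest

def get_arg_summary_alt (arg : String) : String :=
  let lines := PySem.Str.splitlines arg
  let idx? := lines.findIdx? (fun l => PySem.Str.startswith (PySem.Str.strip l) "Copyright ")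
  let prefix0 := match idx? with | none => lines | some i => lines.take i
  let prefix1 := pvDropLeadingEmpty prefix0
  let prefix2 := if idx?.isSome ∧ prefix1 ≠ [] ∧ PySem.Str.strip (prefix1.getLastD "") == ""
                 then prefix1.dropLast else prefix1
  if prefix2 ≠ [] then PySem.Str.join "\n" prefix2 else "TBD"

-- ===== PRECONDITION & SPEC =====
def Spec_get_arg_summary (arg : String) (out : String) : Prop := out = get_arg_summary_alt arg
instance (arg : String) (out : String) : Decidable (Spec_get_arg_summary arg out) := by unfold Spec_get_arg_summary; infer_instance

-- ===== CLAIM (what is proved, stated in full; the proofs are below) =====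
def Claim_equal_get_arg_summary : Prop := ∀ (arg : String), Dom_get_arg_summary arg → Spec_get_arg_summary arg (get_arg_summary arg)

-- ===== LEMMAS AND PROOFS =====

-- abstract state: acc = list of lines kept so far; A's (summary, prev) encode it as
def pvMkS (acc : List String) : String := PySem.Str.join "\n" acc.dropLast
def pvMkP (acc : List String) : String :=
  if acc.dropLast = [] then acc.getLastD "" else "\n" ++ acc.getLastD ""

-- invariant: the first kept line is never the empty string
def pvInv : List String → Prop
  | [] => True
  | h :: _ => h ≠ ""

-- A's post-loop finish
def pvFinish (r : String × String × Bool) : String :=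
  let summary := if r.2.1 ≠ "" ∧ r.2.2 = false then r.1 ++ r.2.1 else r.1
  if summary ≠ "" then summary else "TBD"

-- B's answer, generalized over already-kept lines acc
def pvSpecB (acc : List String) (lines : List String) : String :=
  let idx? := lines.findIdx? (fun l => PySem.Str.startswith (PySem.Str.strip l) "Copyright ")
  let pre := match idx? with | none => lines | some i => lines.take i
  let kept := pvDropLeadingEmpty (acc ++ pre)
  let kept2 := if idx?.isSome ∧ kept ≠ [] ∧ PySem.Str.strip (kept.getLastD "") == ""
               then kept.dropLast else kept
  if kept2 ≠ [] then PySem.Str.join "\n" kept2 else "TBD"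

theorem pv_join_nil : PySem.Str.join "\n" [] = "" := by decide

theorem pv_join_concat (ks : List String) (k : String) :
    PySem.Str.join "\n" (ks ++ [k]) =
      PySem.Str.join "\n" ks ++ (if ks = [] then k else "\n" ++ k) := by
  induction ks with
  | nil =>
    apply String.ext
    simp [PySem.Str.toList_join, PySem.Chars.join_singleton, pv_join_nil]
  | cons h t ih =>
    cases t with
    | nil =>
      apply String.ext
      simp [PySem.Str.toList_join, PySem.Chars.join_singleton, PySem.Chars.join_cons_cons,
            String.toList_append]
    | cons h2 t2 =>
      apply String.ext
      have := congrArg String.toList ih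
      simp [PySem.Str.toList_join, PySem.Chars.join_cons_cons, String.toList_append] at this ⊢
      simp [this]

theorem pv_mkS_mkP (acc : List String) :
    pvMkS acc ++ pvMkP acc = PySem.Str.join "\n" acc := by
  rcases List.eq_nil_or_concat acc with rfl | ⟨ks, k, rfl⟩
  · simp [pvMkS, pvMkP, pv_join_nil]
  · simp only [List.concat_eq_append, pvMkS, pvMkP, List.dropLast_concat,
               List.getLastD_concat, pv_join_concat]

theorem pv_ne_empty_append (s t : String) (h : s ≠ "") : s ++ t ≠ "" := by
  intro he
  apply h
  apply String.ext
  have := congrArg String.toList he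
  simp [String.toList_append] at this
  simp [this.1]

theorem pv_newline_append_ne (k : String) : "\n" ++ k ≠ "" :=
  pv_ne_empty_append "\n" k (by decide)

theorem pv_join_singleton (h : String) : PySem.Str.join "\n" [h] = h := by
  apply String.ext; simp [PySem.Str.toList_join, PySem.Chars.join_singleton]

theorem pv_join_ne (h : String) (t : List String) (hh : h ≠ "") :
    PySem.Str.join "\n" (h :: t) ≠ "" := by
  cases t with
  | nil => rw [pv_join_singleton]; exact hh
  | cons h2 t2 =>
    have : PySem.Str.join "\n" (h :: h2 :: t2) = h ++ ("\n" ++ PySem.Str.join "\n" (h2 :: t2)) := by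
      apply String.ext
      simp [PySem.Str.toList_join, PySem.Chars.join_cons_cons, String.toList_append]
    rw [this]
    exact pv_ne_empty_append _ _ hh

theorem pv_strip_newline (k : String) : PySem.Str.strip ("\n" ++ k) = PySem.Str.strip k := by
  apply String.ext
  simp [PySem.Str.toList_strip, PySem.Chars.strip, PySem.Chars.lstrip, String.toList_append,
        show PySem.Chars.isspace '\n' = true from by decide]

theorem pv_mkP_ne (acc : List String) (hinv : pvInv acc) (hne : acc ≠ []) :
    pvMkP acc ≠ "" := by
  rcases List.eq_nil_or_concat acc with rfl | ⟨ks, k, rfl⟩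
  · exact absurd rfl hne
  · simp only [List.concat_eq_append, pvMkP, List.dropLast_concat, List.getLastD_concat]
    split_ifs with h1
    · subst h1; simpa [pvInv] using hinv
    · exact pv_newline_append_ne k

theorem pv_strip_mkP (acc : List String) :
    PySem.Str.strip (pvMkP acc) = PySem.Str.strip (acc.getLastD "") := by
  simp only [pvMkP]
  split_ifs with h1
  · rfl
  · exact pv_strip_newline _

theorem pv_inv_dropLast (acc : List String) (hinv : pvInv acc) : pvInv acc.dropLast := by
  cases acc with
  | nil => trivial
  | cons h t =>
    cases t with
    | nil => trivial
    | cons h2 t2 => simpa [pvInv] using hinv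

theorem pv_dle_inv (acc : List String) (hinv : pvInv acc) :
    pvDropLeadingEmpty acc = acc := by
  cases acc with
  | nil => rfl
  | cons h t => simp [pvDropLeadingEmpty, pvInv] at hinv ⊢; simp [hinv]

def pvIsCopy (l : String) : Bool := PySem.Str.startswith (PySem.Str.strip l) "Copyright "

theorem pv_specB_cons (acc : List String) (line : String) (rest : List String)
    (hc : PySem.Str.startswith (PySem.Str.strip line) "Copyright " = false) :
    pvSpecB acc (line :: rest) = pvSpecB (acc ++ [line]) rest := by
  unfold pvSpecB
  cases hfind : List.findIdx? (fun l => PySem.Str.startswith (PySem.Str.strip l) "Copyright ") rest with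
  | none =>
    simp only [List.findIdx?_cons, hc, Bool.false_eq_true, if_false, hfind, Option.map_none, Option.isSome_none]
    rw [List.append_cons]
  | some i =>
    simp only [List.findIdx?_cons, hc, Bool.false_eq_true, if_false, hfind, Option.map_some,
               List.take_succ_cons, Option.isSome_some]
    rw [List.append_cons]

theorem pv_specB_empty_line (rest : List String) : pvSpecB [""] rest = pvSpecB [] rest := by
  unfold pvSpecB
  simp [pvDropLeadingEmpty]

theorem pv_loop_eq (lines : List String) :
    ∀ acc : List String, pvInv acc →
      pvFinish (pvLoopA lines (pvMkS acc) (pvMkP acc)) = pvSpecB acc lines := by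
  induction lines with
  | nil =>
    intro acc hinv
    simp only [pvLoopA, pvFinish, pvSpecB, List.findIdx?_nil, List.append_nil,
               pv_dle_inv acc hinv, Option.isSome_none, Bool.false_eq_true, false_and, if_false]
    by_cases hne : acc = []
    · subst hne; simp [pvMkS, pvMkP, pv_join_nil]
    · have hp := pv_mkP_ne acc hinv hne
      simp only [hp, ne_eq, not_false_iff, true_and, if_true, pv_mkS_mkP, hne]
      obtain ⟨h, t, rfl⟩ := List.exists_cons_of_ne_nil hne
      have hj := pv_join_ne h t (by simpa [pvInv] using hinv)
      simp [hj]
  | cons line rest ih =>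
    intro acc hinv
    by_cases hc : PySem.Str.startswith (PySem.Str.strip line) "Copyright " = true
    · -- Copyright line: A breaks, B slices here
      simp only [pvLoopA, hc, if_true, pvFinish, pvSpecB, List.findIdx?_cons, List.take_zero,
                 List.append_nil, pv_dle_inv acc hinv, Option.isSome_some, true_and]
      by_cases hne : acc = []
      · subst hne; simp [pvMkS, pvMkP, pv_join_nil]
      · have hp := pv_mkP_ne acc hinv hne
        rw [pv_strip_mkP acc]
        by_cases hs : (PySem.Str.strip (acc.getLastD "") == "") = true
        · -- blank line right before Copyright: discarded
          simp only [hs, hne, ne_eq, not_false_iff, and_true, if_true,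
                     Bool.true_eq_false, and_false, if_false, pvMkS]
          by_cases hdl : acc.dropLast = []
          · simp [hdl, pv_join_nil]
          · obtain ⟨h, t, hdl2⟩ := List.exists_cons_of_ne_nil hdl
            have hh : h ≠ "" := by
              have := pv_inv_dropLast acc hinv
              rw [hdl2] at this
              simpa [pvInv] using this
            have hj := pv_join_ne h t hh
            rw [hdl2]
            simp [hj]
        · simp only [hs, Bool.false_eq_true, and_false, if_false, hp, ne_eq, not_false_iff,
                     true_and, if_true, pv_mkS_mkP]
          obtain ⟨h, t, rfl⟩ := List.exists_cons_of_ne_nil hne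
          have hj := pv_join_ne h t (by simpa [pvInv] using hinv)
          simp [hj]
    · -- ordinary line: A flushes prev and keeps going; B keeps the line in the slice
      rw [Bool.not_eq_true] at hc
      have unfold1 : ∀ S P : String, pvLoopA (line :: rest) S P =
          pvLoopA rest (if P ≠ "" then S ++ P else S)
            (if (if P ≠ "" then S ++ P else S) ≠ "" then "\n" ++ line else line) := by
        intro S P
        simp only [pvLoopA, hc, Bool.false_eq_true, if_false]
      have e1 : pvMkS ([] : List String) = "" := by simp [pvMkS, pv_join_nil]
      have e2 : pvMkP ([] : List String) = "" := by simp [pvMkP]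
      by_cases hne : acc = []
      · subst hne
        have ih0 := ih [] trivial
        rw [e1, e2] at ih0
        rw [unfold1, e1, e2]
        simp only [ne_eq, not_true_eq_false, if_false]
        by_cases hl : line = ""
        · subst hl
          rw [pv_specB_cons [] "" rest hc, List.nil_append, pv_specB_empty_line]
          simpa using ih0
        · have ih1 := ih [line] (by simpa [pvInv] using hl)
          have f1 : pvMkS [line] = "" := by simp [pvMkS, pv_join_nil]
          have f2 : pvMkP [line] = line := by simp [pvMkP]
          rw [f1, f2] at ih1
          rw [pv_specB_cons [] line rest hc, List.nil_append]
          exact ih1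
      · have hp := pv_mkP_ne acc hinv hne
        have hS : (if pvMkP acc ≠ "" then pvMkS acc ++ pvMkP acc else pvMkS acc) = pvMkS (acc ++ [line]) := by
          rw [if_pos hp, pv_mkS_mkP]
          simp only [pvMkS, List.dropLast_concat]
        have hSne : pvMkS (acc ++ [line]) ≠ "" := by
          simp only [pvMkS, List.dropLast_concat]
          obtain ⟨h, t, rfl⟩ := List.exists_cons_of_ne_nil hne
          exact pv_join_ne h t (by simpa [pvInv] using hinv)
        have hP : (if pvMkS (acc ++ [line]) ≠ "" then "\n" ++ line else line) = pvMkP (acc ++ [line]) := by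
          simp only [hSne, ne_eq, not_false_iff, if_true, pvMkP, List.dropLast_concat,
                     List.getLastD_concat, hne, if_neg]
        have hinv' : pvInv (acc ++ [line]) := by
          obtain ⟨h, t, rfl⟩ := List.exists_cons_of_ne_nil hne
          simpa [pvInv] using (by simpa [pvInv] using hinv : h ≠ "")
        rw [unfold1, hS, hP, ih _ hinv', pv_specB_cons acc line rest hc]

-- ===== VERDICT (by name: the statement is the Claim_ definition above) =====
theorem get_arg_summary_spec : Claim_equal_get_arg_summary := by
  intro arg _
  unfold Spec_get_arg_summary
  have h := pv_loop_eq (PySem.Str.splitlines arg) [] trivial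
  simp only [pvMkS, pvMkP, List.dropLast_nil, List.getLastD_nil, pv_join_nil] at h
  unfold pvFinish pvSpecB at h
  unfold get_arg_summary get_arg_summary_alt
  simpa using h
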